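-- pv_equiv track=rewrite | github.com/syncerpn/leetcode | 3917_count_indices_with_opposite_parity.py | countOppositeParity
-- ===== SOURCE A (Python) =====
-- def countOppositeParity(nums: list[int]) -> list[int]:
--     n = len(nums)
--     ans = [0] * n
--     o, e = 0, 0
--     for i in range(n-1, -1, -1):
--         if nums[i] % 2:
--             ans[i] = e
--             o += 1
--         else:
--             ans[i] = o
--             e += 1
--     return ans
-- ===== SOURCE B (Python) =====
-- def countOppositeParity(nums: list[int]) -> list[int]:
--     evens = sum(1 for x in nums if x % 2 == 0)
--     odds = len(nums) - evens
--     seen_even, seen_odd = 0, 0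
--     ans = []
--     for x in nums:
--         if x % 2:
--             ans.append(evens - seen_even)
--             seen_odd += 1
--         else:
--             ans.append(odds - seen_odd)
--             seen_even += 1
--     return ans
-- ===== Notes on version B (the rewrite author's own statement) =====
-- stated objective: alternative
-- what changed: B replaces A's backward pass with suffix counters written into a preallocated array by a forward pass that subtracts growing prefix counters from precomputed global even/odd totals, appending results in order.
import Mathlib
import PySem

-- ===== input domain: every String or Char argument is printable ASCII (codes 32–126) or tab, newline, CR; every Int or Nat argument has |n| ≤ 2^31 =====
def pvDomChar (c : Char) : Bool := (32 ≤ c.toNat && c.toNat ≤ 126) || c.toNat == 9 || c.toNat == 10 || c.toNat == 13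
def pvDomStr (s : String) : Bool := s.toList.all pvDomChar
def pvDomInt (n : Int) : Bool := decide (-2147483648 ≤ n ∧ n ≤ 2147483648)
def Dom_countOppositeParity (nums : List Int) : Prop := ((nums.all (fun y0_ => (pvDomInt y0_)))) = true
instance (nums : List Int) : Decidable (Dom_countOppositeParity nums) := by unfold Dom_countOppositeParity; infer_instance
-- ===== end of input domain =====

-- B recomputes A's answers by a forward pass subtracting prefix counters from global
-- even/odd totals, instead of A's backward pass with suffix counters (objective: alternative).

-- ===== PORT A =====
-- A's loop runs i = n-1 … 0, writing ans[i] from suffix counters (o, e); the structural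
-- recursion below performs exactly that right-to-left computation: it processes the tail
-- first and returns (ans-so-far, o, e) in the same order A's loop visits the indices.
def countOppositeParityGoA : List Int → List Int × Int × Int
  | [] => ([], 0, 0)
  | x :: t =>
    let r := countOppositeParityGoA t
    if PySem.Int.mod x 2 ≠ 0 then (r.2.2 :: r.1, r.2.1 + 1, r.2.2)
    else (r.2.1 :: r.1, r.2.1, r.2.2 + 1)

def countOppositeParity (nums : List Int) : List Int :=
  (countOppositeParityGoA nums).1

-- ===== PORT B =====
-- forward pass: (E - seen_even) for odd elements, (O - seen_odd) for even ones
def countOppositeParityGoB (E O se so : Int) : List Int → List Int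
  | [] => []
  | x :: t =>
    if PySem.Int.mod x 2 ≠ 0 then (E - se) :: countOppositeParityGoB E O se (so + 1) t
    else (O - so) :: countOppositeParityGoB E O (se + 1) so t

def countOppositeParity_alt (nums : List Int) : List Int :=
  let evens : Int := nums.foldl (fun acc x => if PySem.Int.mod x 2 == 0 then acc + 1 else acc) 0
  let odds : Int := (nums.length : Int) - evens
  countOppositeParityGoB evens odds 0 0 nums

-- ===== PRECONDITION & SPEC =====
def Spec_countOppositeParity (nums : List Int) (out : List Int) : Prop := out = countOppositeParity_alt nums
instance (nums : List Int) (out : List Int) : Decidable (Spec_countOppositeParity nums out) := by unfold Spec_countOppositeParity; infer_instance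

-- ===== CLAIM (what is proved, stated in full; the proofs are below) =====
def Claim_equal_countOppositeParity : Prop := ∀ (nums : List Int), Dom_countOppositeParity nums → Spec_countOppositeParity nums (countOppositeParity nums)

-- ===== LEMMAS AND PROOFS =====

-- A's suffix counters equal the even/odd counts of the processed suffix
def pvCntE : List Int → Int
  | [] => 0
  | x :: t => (if PySem.Int.mod x 2 = 0 then 1 else 0) + pvCntE t

def pvCntO : List Int → Int
  | [] => 0
  | x :: t => (if PySem.Int.mod x 2 ≠ 0 then 1 else 0) + pvCntO t

lemma goA_counts (t : List Int) :
    (countOppositeParityGoA t).2.1 = pvCntO t ∧ (countOppositeParityGoA t).2.2 = pvCntE t := by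
  induction t with
  | nil => simp [countOppositeParityGoA, pvCntO, pvCntE]
  | cons x t ih =>
    by_cases h : PySem.Int.mod x 2 = 0
    · simp only [countOppositeParityGoA, pvCntO, pvCntE, if_neg (not_not_intro h), if_pos h]
      exact ⟨by rw [ih.1]; ring, by rw [ih.2]; ring⟩
    · simp only [countOppositeParityGoA, pvCntO, pvCntE, if_pos h, if_neg h]
      exact ⟨by rw [ih.1]; ring, by rw [ih.2]; ring⟩

lemma cnt_sum (t : List Int) : pvCntE t + pvCntO t = (t.length : Int) := by
  induction t with
  | nil => simp [pvCntE, pvCntO]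
  | cons x t ih =>
    by_cases h : PySem.Int.mod x 2 = 0
    · simp only [pvCntE, pvCntO, if_pos h, if_neg (not_not_intro h), List.length_cons]
      push_cast; omega
    · simp only [pvCntE, pvCntO, if_neg h, if_pos h, List.length_cons]
      push_cast; omega

lemma foldl_cntE (t : List Int) (acc : Int) :
    t.foldl (fun acc x => if PySem.Int.mod x 2 == 0 then acc + 1 else acc) acc
      = acc + pvCntE t := by
  induction t generalizing acc with
  | nil => simp [pvCntE]
  | cons x t ih =>
    by_cases h : PySem.Int.mod x 2 = 0
    · simp only [List.foldl]
      rw [if_pos (by simp [beq_iff_eq] at h ⊢; exact h), ih]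
      simp only [pvCntE, if_pos h]
      ring
    · simp only [List.foldl]
      rw [if_neg (by
        have h1 : PySem.Int.mod x 2 = x % 2 := PySem.Int.mod_eq_emod_of_pos (by norm_num)
        rw [h1] at h; simp [beq_iff_eq]; omega), ih]
      simp only [pvCntE, if_neg h]
      ring

lemma goB_eq_goA (t : List Int) (E O se so : Int)
    (hE : E - se = pvCntE t) (hO : O - so = pvCntO t) :
    countOppositeParityGoB E O se so t = (countOppositeParityGoA t).1 := by
  induction t generalizing se so with
  | nil => simp [countOppositeParityGoB, countOppositeParityGoA]
  | cons x t ih =>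
    have hc := goA_counts t
    by_cases h : PySem.Int.mod x 2 = 0
    · simp only [pvCntE, pvCntO, if_pos h, if_neg (not_not_intro h)] at hE hO
      simp only [countOppositeParityGoB, countOppositeParityGoA,
        if_neg (not_not_intro h)]
      rw [ih (se + 1) so (by omega) (by omega)]
      simp [hc.1]
      omega
    · simp only [pvCntE, pvCntO, if_neg h, if_pos h] at hE hO
      simp only [countOppositeParityGoB, countOppositeParityGoA, if_pos h]
      rw [ih se (so + 1) (by omega) (by omega)]
      simp [hc.2]
      omega

-- ===== VERDICT (by name: the statement is the Claim_ definition above) =====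
theorem countOppositeParity_spec : Claim_equal_countOppositeParity := by
  intro nums _
  unfold Spec_countOppositeParity countOppositeParity countOppositeParity_alt
  have hf := foldl_cntE nums 0
  rw [hf]
  have := cnt_sum nums
  exact (goB_eq_goA nums (0 + pvCntE nums) ((nums.length : Int) - (0 + pvCntE nums)) 0 0
    (by omega) (by omega)).symm
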